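-- pv_equiv track=rewrite | github.com/aleksandr-bogdanov/whendoist | app/services/todoist_import.py | _parse_clarity_from_labels
-- ===== SOURCE A (Python) =====
-- def _parse_clarity_from_labels(labels: list[str]) -> str | None:
--     """
--     Extract mode level from Todoist labels.
--
--     Looks for labels like @executable/@autopilot/@clear, @defined/@normal, @exploratory/@brainstorm/@open.
--     """
--     label_lower = [label.lower() for label in labels]
--
--     autopilot_names = {"executable", "@executable", "autopilot", "@autopilot", "clear", "@clear"}
--     normal_names = {"defined", "@defined", "normal", "@normal"}
--     brainstorm_names = {"exploratory", "@exploratory", "brainstorm", "@brainstorm", "open", "@open"}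
--
--     if autopilot_names & set(label_lower):
--         return "autopilot"
--     if normal_names & set(label_lower):
--         return "normal"
--     if brainstorm_names & set(label_lower):
--         return "brainstorm"
--
--     return None
-- ===== SOURCE B (Python) =====
-- def _parse_clarity_from_labels(labels: list[str]) -> str | None:
--     """
--     Extract mode level from Todoist labels.
--
--     One flat token->mode index, a single pass collecting matched modes,
--     then a fixed-priority pick.
--     """
--     token_mode = {}
--     for mode, names in (
--         ("autopilot", ("executable", "autopilot", "clear")),
--         ("normal", ("defined", "normal")),
--         ("brainstorm", ("exploratory", "brainstorm", "open")),
--     ):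
--         for name in names:
--             token_mode[name] = mode
--             token_mode["@" + name] = mode
--
--     found = set()
--     for label in labels:
--         mode = token_mode.get(label.lower())
--         if mode is not None:
--             found.add(mode)
--
--     for mode in ("autopilot", "normal", "brainstorm"):
--         if mode in found:
--             return mode
--     return None
-- ===== Notes on version B (the rewrite author's own statement) =====
-- stated objective: idiomatic
-- what changed: Replaces A's three per-mode set intersections (each materialising set(label_lower)) with one flat token-to-mode dict, a single pass over the labels collecting matched modes into a set, and a fixed-priority pick afterwards.
import Mathlib
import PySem

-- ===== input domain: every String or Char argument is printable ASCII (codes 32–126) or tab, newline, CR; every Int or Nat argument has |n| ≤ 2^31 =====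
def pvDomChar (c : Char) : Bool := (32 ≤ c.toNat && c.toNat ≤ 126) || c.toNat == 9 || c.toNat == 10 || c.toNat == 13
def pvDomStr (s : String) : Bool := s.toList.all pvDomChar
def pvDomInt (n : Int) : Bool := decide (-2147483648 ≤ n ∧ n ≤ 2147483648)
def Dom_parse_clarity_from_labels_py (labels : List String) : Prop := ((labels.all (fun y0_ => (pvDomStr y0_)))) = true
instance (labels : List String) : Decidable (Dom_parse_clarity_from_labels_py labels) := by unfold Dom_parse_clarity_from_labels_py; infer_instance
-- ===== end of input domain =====

-- B replaces A's three set intersections by one flat token→mode index, a single pass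
-- collecting matched modes, and a fixed-priority pick (objective: idiomatic).

-- ===== PORT A =====
def parse_clarity_from_labels_py (labels : List String) : Option String :=
  let label_lower := labels.map PySem.Str.lower
  let autopilot_names : PySem.Set String :=
    PySem.Set.ofList ["executable", "@executable", "autopilot", "@autopilot", "clear", "@clear"]
  let normal_names : PySem.Set String :=
    PySem.Set.ofList ["defined", "@defined", "normal", "@normal"]
  let brainstorm_names : PySem.Set String :=
    PySem.Set.ofList ["exploratory", "@exploratory", "brainstorm", "@brainstorm", "open", "@open"]
  if PySem.Set.inter autopilot_names (PySem.Set.ofList label_lower) ≠ [] then some "autopilot"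
  else if PySem.Set.inter normal_names (PySem.Set.ofList label_lower) ≠ [] then some "normal"
  else if PySem.Set.inter brainstorm_names (PySem.Set.ofList label_lower) ≠ [] then some "brainstorm"
  else none

-- ===== PORT B =====
-- the token→mode dict built by B's two nested loops
def pvTokenMode : PySem.Dict String String :=
  [("autopilot", ["executable", "autopilot", "clear"]),
   ("normal", ["defined", "normal"]),
   ("brainstorm", ["exploratory", "brainstorm", "open"])].foldl
    (fun d p => p.2.foldl (fun d n => (d.insert n p.1).insert ("@" ++ n) p.1) d)
    PySem.Dict.empty

def parse_clarity_from_labels_py_alt (labels : List String) : Option String :=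
  let found : PySem.Set String :=
    labels.foldl (fun s label =>
      match pvTokenMode.get? (PySem.Str.lower label) with
      | some m => PySem.Set.add s m
      | none => s) PySem.Set.empty
  ["autopilot", "normal", "brainstorm"].find? (fun m => PySem.Set.contains found m)

-- ===== PRECONDITION & SPEC =====
def Spec_parse_clarity_from_labels_py (labels : List String) (out : Option String) : Prop := out = parse_clarity_from_labels_py_alt labels
instance (labels : List String) (out : Option String) : Decidable (Spec_parse_clarity_from_labels_py labels out) := by unfold Spec_parse_clarity_from_labels_py; infer_instance

-- ===== CLAIM (what is proved, stated in full; the proofs are below) =====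
def Claim_equal_parse_clarity_from_labels_py : Prop := ∀ (labels : List String), Dom_parse_clarity_from_labels_py labels → Spec_parse_clarity_from_labels_py labels (parse_clarity_from_labels_py labels)

-- ===== LEMMAS AND PROOFS =====

-- A's intersection test, characterised
theorem pv_inter_ne_nil (names : List String) (labels : List String) :
    (PySem.Set.inter (PySem.Set.ofList names) (PySem.Set.ofList (labels.map PySem.Str.lower)) ≠ [])
      ↔ ∃ l ∈ labels, PySem.Str.lower l ∈ names := by
  rw [Ne, List.eq_nil_iff_forall_not_mem]
  push Not
  constructor
  · rintro ⟨x, hx⟩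
    rw [PySem.Set.mem_inter, PySem.Set.mem_ofList, PySem.Set.mem_ofList, List.mem_map] at hx
    obtain ⟨hn, l, hl, rfl⟩ := hx
    exact ⟨l, hl, hn⟩
  · rintro ⟨l, hl, hn⟩
    refine ⟨PySem.Str.lower l, ?_⟩
    rw [PySem.Set.mem_inter, PySem.Set.mem_ofList, PySem.Set.mem_ofList, List.mem_map]
    exact ⟨hn, l, hl, rfl⟩

-- the concrete value of the token→mode dict
theorem pvTokenMode_eq : pvTokenMode = PySem.Dict.mk
    [("executable", "autopilot"), ("@executable", "autopilot"),
     ("autopilot", "autopilot"), ("@autopilot", "autopilot"),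
     ("clear", "autopilot"), ("@clear", "autopilot"),
     ("defined", "normal"), ("@defined", "normal"),
     ("normal", "normal"), ("@normal", "normal"),
     ("exploratory", "brainstorm"), ("@exploratory", "brainstorm"),
     ("brainstorm", "brainstorm"), ("@brainstorm", "brainstorm"),
     ("open", "brainstorm"), ("@open", "brainstorm")] := by decide

theorem pv_get?_auto (s : String) : pvTokenMode.get? s = some "autopilot"
    ↔ s ∈ ["executable", "@executable", "autopilot", "@autopilot", "clear", "@clear"] := by
  rw [pvTokenMode_eq, PySem.Dict.get?_eq_some_iff_mem_items]
  · simp [Prod.ext_iff]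
  · decide

theorem pv_get?_normal (s : String) : pvTokenMode.get? s = some "normal"
    ↔ s ∈ ["defined", "@defined", "normal", "@normal"] := by
  rw [pvTokenMode_eq, PySem.Dict.get?_eq_some_iff_mem_items]
  · simp [Prod.ext_iff]
  · decide

theorem pv_get?_brain (s : String) : pvTokenMode.get? s = some "brainstorm"
    ↔ s ∈ ["exploratory", "@exploratory", "brainstorm", "@brainstorm", "open", "@open"] := by
  rw [pvTokenMode_eq, PySem.Dict.get?_eq_some_iff_mem_items]
  · simp [Prod.ext_iff]
  · decide

-- B's fold, characterised
theorem pv_mem_found (labels : List String) (s : PySem.Set String) (m : String) :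
    m ∈ labels.foldl (fun s label =>
        match pvTokenMode.get? (PySem.Str.lower label) with
        | some v => PySem.Set.add s v
        | none => s) s
      ↔ m ∈ s ∨ ∃ l ∈ labels, pvTokenMode.get? (PySem.Str.lower l) = some m := by
  induction labels generalizing s with
  | nil => simp
  | cons a t ih =>
    simp only [List.foldl_cons, ih]
    cases h : pvTokenMode.get? (PySem.Str.lower a) with
    | none =>
      simp only [List.mem_cons]
      constructor
      · rintro (hs | ⟨l, hl, hm⟩)
        · exact Or.inl hs
        · exact Or.inr ⟨l, Or.inr hl, hm⟩
      · rintro (hs | ⟨l, rfl | hl, hm⟩)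
        · exact Or.inl hs
        · rw [h] at hm; cases hm
        · exact Or.inr ⟨l, hl, hm⟩
    | some v =>
      rw [PySem.Set.mem_add]
      simp only [List.mem_cons]
      constructor
      · rintro ((hs | rfl) | ⟨l, hl, hm⟩)
        · exact Or.inl hs
        · exact Or.inr ⟨a, Or.inl rfl, h⟩
        · exact Or.inr ⟨l, Or.inr hl, hm⟩
      · rintro (hs | ⟨l, rfl | hl, hm⟩)
        · exact Or.inl (Or.inl hs)
        · rw [h] at hm; exact Or.inl (Or.inr (Option.some.inj hm).symm)
        · exact Or.inr ⟨l, hl, hm⟩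

theorem parse_clarity_main (labels : List String) :
    parse_clarity_from_labels_py labels = parse_clarity_from_labels_py_alt labels := by
  unfold parse_clarity_from_labels_py parse_clarity_from_labels_py_alt
  have hF : ∀ m : String,
      PySem.Set.contains (labels.foldl (fun s label =>
        match pvTokenMode.get? (PySem.Str.lower label) with
        | some v => PySem.Set.add s v
        | none => s) PySem.Set.empty) m = true
      ↔ ∃ l ∈ labels, pvTokenMode.get? (PySem.Str.lower l) = some m := by
    intro m
    rw [PySem.Set.contains_iff, pv_mem_found]
    simp [PySem.Set.empty]
  by_cases h1 : ∃ l ∈ labels, PySem.Str.lower l ∈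
      ["executable", "@executable", "autopilot", "@autopilot", "clear", "@clear"]
  · rw [if_pos ((pv_inter_ne_nil _ labels).mpr h1)]
    have hc : PySem.Set.contains _ "autopilot" = true :=
      (hF "autopilot").mpr (by obtain ⟨l, hl, hm⟩ := h1; exact ⟨l, hl, (pv_get?_auto _).mpr hm⟩)
    rw [List.find?_cons_of_pos hc]
  · rw [if_neg (fun hne => h1 ((pv_inter_ne_nil _ labels).mp hne))]
    have hc1 : ¬ (PySem.Set.contains (labels.foldl (fun s label =>
          match pvTokenMode.get? (PySem.Str.lower label) with
          | some v => PySem.Set.add s v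
          | none => s) PySem.Set.empty) "autopilot") = true :=
      (fun hc =>
        h1 (by obtain ⟨l, hl, hm⟩ := (hF "autopilot").mp hc; exact ⟨l, hl, (pv_get?_auto _).mp hm⟩))
    rw [List.find?_cons_of_neg (by exact hc1)]
    by_cases h2 : ∃ l ∈ labels, PySem.Str.lower l ∈ ["defined", "@defined", "normal", "@normal"]
    · rw [if_pos ((pv_inter_ne_nil _ labels).mpr h2)]
      have hc : PySem.Set.contains _ "normal" = true :=
        (hF "normal").mpr (by obtain ⟨l, hl, hm⟩ := h2; exact ⟨l, hl, (pv_get?_normal _).mpr hm⟩)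
      rw [List.find?_cons_of_pos hc]
    · rw [if_neg (fun hne => h2 ((pv_inter_ne_nil _ labels).mp hne))]
      have hc2 : ¬ (PySem.Set.contains (labels.foldl (fun s label =>
          match pvTokenMode.get? (PySem.Str.lower label) with
          | some v => PySem.Set.add s v
          | none => s) PySem.Set.empty) "normal") = true :=
        (fun hc =>
          h2 (by obtain ⟨l, hl, hm⟩ := (hF "normal").mp hc; exact ⟨l, hl, (pv_get?_normal _).mp hm⟩))
      rw [List.find?_cons_of_neg (by exact hc2)]
      by_cases h3 : ∃ l ∈ labels, PySem.Str.lower l ∈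
          ["exploratory", "@exploratory", "brainstorm", "@brainstorm", "open", "@open"]
      · rw [if_pos ((pv_inter_ne_nil _ labels).mpr h3)]
        have hc : PySem.Set.contains _ "brainstorm" = true :=
          (hF "brainstorm").mpr (by obtain ⟨l, hl, hm⟩ := h3; exact ⟨l, hl, (pv_get?_brain _).mpr hm⟩)
        rw [List.find?_cons_of_pos hc]
      · rw [if_neg (fun hne => h3 ((pv_inter_ne_nil _ labels).mp hne))]
        have hc3 : ¬ (PySem.Set.contains (labels.foldl (fun s label =>
          match pvTokenMode.get? (PySem.Str.lower label) with
          | some v => PySem.Set.add s v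
          | none => s) PySem.Set.empty) "brainstorm") = true :=
          (fun hc =>
            h3 (by obtain ⟨l, hl, hm⟩ := (hF "brainstorm").mp hc; exact ⟨l, hl, (pv_get?_brain _).mp hm⟩))
        rw [List.find?_cons_of_neg (by exact hc3)]
        simp [List.find?]

-- ===== VERDICT (by name: the statement is the Claim_ definition above) =====
theorem parse_clarity_from_labels_py_spec : Claim_equal_parse_clarity_from_labels_py := by
  intro labels _
  unfold Spec_parse_clarity_from_labels_py
  exact parse_clarity_main labels
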